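-- pv_equiv track=rewrite | github.com/Xenologo/Fieldgrade | mite_ecology/mite_ecology/bundle_accept.py | _count_new_entities
-- ===== SOURCE A (Python) =====
-- from typing import Dict, Iterable, List, Optional, Tuple
--
-- def _count_new_entities(delta_ops: List[Dict]) -> Tuple[int, int]:
--     new_nodes = 0
--     new_edges = 0
--     for op in delta_ops:
--         k = str(op.get("op") or "")
--         if k in ("ADD_NODE", "upsert_node"):
--             new_nodes += 1
--         elif k in ("ADD_EDGE", "upsert_edge"):
--             new_edges += 1
--     return new_nodes, new_edges
-- ===== SOURCE B (Python) =====
-- from typing import Dict, List, Tuple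
--
-- def _count_new_entities(delta_ops: List[Dict]) -> Tuple[int, int]:
--     # Stage 1: project the raw "op" values (no normalization needed: the falsy
--     # values None/""/0 that A's `str(... or "")` collapses to "" can never equal
--     # any of the four non-empty key strings).
--     ops = [op.get("op") for op in delta_ops]
--     # Stage 2: count each bucket with list.count.
--     return (ops.count("ADD_NODE") + ops.count("upsert_node"),
--             ops.count("ADD_EDGE") + ops.count("upsert_edge"))
-- ===== Notes on version B (the rewrite author's own statement) =====
-- stated objective: idiomatic
-- what changed: Replaces A's single pass with per-element normalization and branch-and-increment counters by a staged decomposition: project the raw op values once, then tally each of the four buckets with list.count, dropping the str(... or "") normalization entirely (safe because falsy values never equal the non-empty keys).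
import Mathlib
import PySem

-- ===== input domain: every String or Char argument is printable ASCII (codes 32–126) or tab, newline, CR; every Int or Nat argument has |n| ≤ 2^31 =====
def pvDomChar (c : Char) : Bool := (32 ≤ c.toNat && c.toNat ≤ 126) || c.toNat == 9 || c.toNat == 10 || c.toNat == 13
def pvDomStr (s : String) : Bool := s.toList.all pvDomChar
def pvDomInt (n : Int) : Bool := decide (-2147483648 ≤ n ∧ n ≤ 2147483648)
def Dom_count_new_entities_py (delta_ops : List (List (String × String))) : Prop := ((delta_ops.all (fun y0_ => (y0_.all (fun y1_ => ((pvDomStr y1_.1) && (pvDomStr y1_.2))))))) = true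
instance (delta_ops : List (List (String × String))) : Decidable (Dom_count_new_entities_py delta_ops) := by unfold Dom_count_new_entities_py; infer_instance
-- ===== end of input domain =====

-- B projects the raw op values once and tallies each bucket with list.count (no per-element
-- normalization or branching), instead of A's single branch-and-increment pass (idiomatic; same cost).

-- ===== PORT A =====
-- k = str(op.get("op") or "")  (the value is already a string; None and '' are falsy and map to '')
def pvKeyA (op : List (String × String)) : String :=
  match (PySem.Dict.mk op).get? "op" with
  | some v => if v = "" then "" else v
  | none => ""

def pvLoopA : List (List (String × String)) → Int → Int → Int × Int
  | [], new_nodes, new_edges => (new_nodes, new_edges)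
  | op :: rest, new_nodes, new_edges =>
    let k := pvKeyA op
    if k = "ADD_NODE" ∨ k = "upsert_node" then pvLoopA rest (new_nodes + 1) new_edges
    else if k = "ADD_EDGE" ∨ k = "upsert_edge" then pvLoopA rest new_nodes (new_edges + 1)
    else pvLoopA rest new_nodes new_edges

def count_new_entities_py (delta_ops : List (List (String × String))) : Int × Int :=
  pvLoopA delta_ops 0 0

-- ===== PORT B =====
-- ops = [op.get("op") for op in delta_ops]; then four list.count reads
def count_new_entities_py_alt (delta_ops : List (List (String × String))) : Int × Int :=
  let ops := delta_ops.map (fun op => (PySem.Dict.mk op).get? "op")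
  ((PySem.List.count ops (some "ADD_NODE") : Int) + (PySem.List.count ops (some "upsert_node") : Int),
   (PySem.List.count ops (some "ADD_EDGE") : Int) + (PySem.List.count ops (some "upsert_edge") : Int))

-- ===== PRECONDITION & SPEC =====
def Spec_count_new_entities_py (delta_ops : List (List (String × String))) (out : Int × Int) : Prop := out = count_new_entities_py_alt delta_ops
instance (delta_ops : List (List (String × String))) (out : Int × Int) : Decidable (Spec_count_new_entities_py delta_ops out) := by unfold Spec_count_new_entities_py; infer_instance

-- ===== CLAIM (what is proved, stated in full; the proofs are below) =====
def Claim_equal_count_new_entities_py : Prop := ∀ (delta_ops : List (List (String × String))), Dom_count_new_entities_py delta_ops → Spec_count_new_entities_py delta_ops (count_new_entities_py delta_ops)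

-- ===== LEMMAS AND PROOFS =====
-- A's normalized key equals a non-empty target string iff the raw lookup returned exactly it
theorem pvKeyA_eq_iff (op : List (String × String)) (t : String) (ht : t ≠ "") :
    pvKeyA op = t ↔ (PySem.Dict.mk op).get? "op" = some t := by
  unfold pvKeyA
  cases h : (PySem.Dict.mk op).get? "op" with
  | none => simp [Ne.symm ht]
  | some v =>
    by_cases hv : v = "" <;> simp [hv, Ne.symm ht]

theorem pvLoopA_counts (l : List (List (String × String))) (n e : Int) :
    pvLoopA l n e =
      (n + ((l.map (fun op => (PySem.Dict.mk op).get? "op")).count (some "ADD_NODE") : Int)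
         + ((l.map (fun op => (PySem.Dict.mk op).get? "op")).count (some "upsert_node") : Int),
       e + ((l.map (fun op => (PySem.Dict.mk op).get? "op")).count (some "ADD_EDGE") : Int)
         + ((l.map (fun op => (PySem.Dict.mk op).get? "op")).count (some "upsert_edge") : Int)) := by
  induction l generalizing n e with
  | nil => simp [pvLoopA]
  | cons op rest ih =>
    simp only [pvLoopA, List.map_cons, List.count_cons]
    by_cases h1 : pvKeyA op = "ADD_NODE" ∨ pvKeyA op = "upsert_node"
    · rw [if_pos h1, ih]
      rcases h1 with h | h <;>
        rw [pvKeyA_eq_iff op _ (by decide)] at h <;>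
        simp [h] <;> omega
    · rw [if_neg h1]
      rw [not_or] at h1
      by_cases h2 : pvKeyA op = "ADD_EDGE" ∨ pvKeyA op = "upsert_edge"
      · rw [if_pos h2, ih]
        rcases h2 with h | h <;>
          rw [pvKeyA_eq_iff op _ (by decide)] at h <;>
          simp [h] <;> omega
      · rw [if_neg h2, ih]
        rw [not_or] at h2
        rw [pvKeyA_eq_iff op _ (by decide), pvKeyA_eq_iff op _ (by decide)] at h1
        rw [pvKeyA_eq_iff op _ (by decide), pvKeyA_eq_iff op _ (by decide)] at h2
        simp [beq_iff_eq, h1.1, h1.2, h2.1, h2.2]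

-- ===== VERDICT (by name: the statement is the Claim_ definition above) =====
theorem count_new_entities_py_spec : Claim_equal_count_new_entities_py := by
  intro delta_ops _
  unfold Spec_count_new_entities_py count_new_entities_py count_new_entities_py_alt
  rw [pvLoopA_counts]
  simp [PySem.List.count_eq]
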